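-- pv_equiv track=rewrite | github.com/meta-introspector/meta-meme | find_lists_of_lists.py | is_list_of_lists
-- ===== SOURCE A (Python) =====
-- def is_list_of_lists(path):
--     """Check if file is a manifest/config that lists other files."""
--     list_patterns = [
--         'Cargo.toml', 'Cargo.lock',
--         'package.json', 'package-lock.json',
--         'Makefile', 'CMakeLists.txt',
--         'build.rs', 'build.gradle',
--         'pom.xml', 'requirements.txt',
--         'go.mod', 'go.sum',
--         'lakefile.lean', 'lean-toolchain',
--         '_CoqProject', 'dune', 'dune-project',
--         '.gitmodules', 'flake.nix',
--         'index.json', 'manifest.json',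
--     ]
--
--     path_lower = path.lower()
--     return any(pattern.lower() in path_lower for pattern in list_patterns)
-- ===== SOURCE B (Python) =====
-- # B: first-character dispatch table — a literal dict mapping a pattern's (lowered)
-- # first character to the tails of the patterns starting with it; one scan of the
-- # lowered path consults only the (at most 3) patterns whose first char matches.
-- _INDEX = {
--     'c': ('argo.toml', 'argo.lock', 'makelists.txt'),
--     'p': ('ackage.json', 'ackage-lock.json', 'om.xml'),
--     'm': ('akefile', 'anifest.json'),
--     'b': ('uild.rs', 'uild.gradle'),
--     'r': ('equirements.txt',),
--     'g': ('o.mod', 'o.sum'),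
--     'l': ('akefile.lean', 'ean-toolchain'),
--     '_': ('coqproject',),
--     'd': ('une', 'une-project'),
--     '.': ('gitmodules',),
--     'f': ('lake.nix',),
--     'i': ('ndex.json',),
-- }
--
-- def is_list_of_lists(path):
--     s = path.lower()
--     for i, ch in enumerate(s):
--         for rest in _INDEX.get(ch, ()):
--             if s.startswith(rest, i + 1):
--                 return True
--     return False
-- ===== Notes on version B (the rewrite author's own statement) =====
-- stated objective: alternative
-- what changed: Replaces A's per-pattern substring searches (21 'in' tests over the whole path) by a single scan of the lowered path driven by a first-character dispatch table: a literal dict from a pattern's first character to the tails of the patterns starting with it, so at each position only the few matching-head patterns are tested.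
import Mathlib
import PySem

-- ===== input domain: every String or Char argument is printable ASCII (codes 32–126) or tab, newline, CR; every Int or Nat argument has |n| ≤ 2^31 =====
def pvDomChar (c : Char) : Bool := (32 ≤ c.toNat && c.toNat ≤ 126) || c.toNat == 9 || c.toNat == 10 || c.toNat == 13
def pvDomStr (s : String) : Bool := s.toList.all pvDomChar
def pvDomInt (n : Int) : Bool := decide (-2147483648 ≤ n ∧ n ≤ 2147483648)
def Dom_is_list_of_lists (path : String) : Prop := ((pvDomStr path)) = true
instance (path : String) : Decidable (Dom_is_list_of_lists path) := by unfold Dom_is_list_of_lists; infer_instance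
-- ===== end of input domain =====

-- B replaces A's 21 per-pattern substring searches by one scan of the lowered path
-- using a first-character dispatch table (dict: first char -> pattern tails); alternative, same cost.

-- ===== PORT A =====
def pvPatternsA : List String := [
  "Cargo.toml", "Cargo.lock",
  "package.json", "package-lock.json",
  "Makefile", "CMakeLists.txt",
  "build.rs", "build.gradle",
  "pom.xml", "requirements.txt",
  "go.mod", "go.sum",
  "lakefile.lean", "lean-toolchain",
  "_CoqProject", "dune", "dune-project",
  ".gitmodules", "flake.nix",
  "index.json", "manifest.json"]

def is_list_of_lists (path : String) : Bool :=
  let path_lower := PySem.Str.lower path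
  pvPatternsA.any (fun pattern => PySem.Str.isIn (PySem.Str.lower pattern) path_lower)

-- ===== PORT B =====
-- Source B's literal dispatch dict _INDEX, as an association list (insertion order)
def pvIndex : List (Char × List String) := [
  ('c', ["argo.toml", "argo.lock", "makelists.txt"]),
  ('p', ["ackage.json", "ackage-lock.json", "om.xml"]),
  ('m', ["akefile", "anifest.json"]),
  ('b', ["uild.rs", "uild.gradle"]),
  ('r', ["equirements.txt"]),
  ('g', ["o.mod", "o.sum"]),
  ('l', ["akefile.lean", "ean-toolchain"]),
  ('_', ["coqproject"]),
  ('d', ["une", "une-project"]),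
  ('.', ["gitmodules"]),
  ('f', ["lake.nix"]),
  ('i', ["ndex.json"])]

-- _INDEX.get(ch, ()) on the literal dict: first-match association-list lookup
def pvGetIndex : List (Char × List String) → Char → List String
  | [], _ => []
  | (k, v) :: rest, c => if k == c then v else pvGetIndex rest c

-- Source B's 'for i, ch in enumerate(s)' loop as structural recursion on the suffix of s
-- starting at i; s.startswith(rest, i+1) is startswith of the tail after ch.
def pvScanB : List Char → Bool
  | [] => false
  | c :: t =>
      if (pvGetIndex pvIndex c).any (fun r => PySem.Chars.startswith t r.toList) then true
      else pvScanB t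

def is_list_of_lists_alt (path : String) : Bool :=
  pvScanB (PySem.Str.lower path).toList

-- ===== PRECONDITION & SPEC =====
def Spec_is_list_of_lists (path : String) (out : Bool) : Prop := out = is_list_of_lists_alt path
instance (path : String) (out : Bool) : Decidable (Spec_is_list_of_lists path out) := by unfold Spec_is_list_of_lists; infer_instance

-- ===== CLAIM =====
def Claim_equal_is_list_of_lists : Prop := ∀ (path : String), Dom_is_list_of_lists path → Spec_is_list_of_lists path (is_list_of_lists path)

-- ===== LEMMAS AND PROOFS =====

-- the lowered A-side patterns
def pvPatternsL : List String := [
  "cargo.toml", "cargo.lock",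
  "package.json", "package-lock.json",
  "makefile", "cmakelists.txt",
  "build.rs", "build.gradle",
  "pom.xml", "requirements.txt",
  "go.mod", "go.sum",
  "lakefile.lean", "lean-toolchain",
  "_coqproject", "dune", "dune-project",
  ".gitmodules", "flake.nix",
  "index.json", "manifest.json"]

theorem pv_patterns_lower : pvPatternsA.map PySem.Str.lower = pvPatternsL := by decide

theorem pv_patterns_ne_nil : ∀ q ∈ pvPatternsL, q.toList ≠ [] := by decide

-- Python's s.startswith at an advanced position, one character at a time
theorem pv_startswith_cons (a : Char) (r : List Char) (c : Char) (t : List Char) :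
    PySem.Chars.startswith (c :: t) (a :: r) = ((a == c) && PySem.Chars.startswith t r) := by
  simp [PySem.Chars.startswith, List.isPrefixOf]

-- dispatch correctness: testing the tails indexed under c against t is exactly
-- testing every lowered pattern against c :: t
set_option maxHeartbeats 2000000 in
theorem pv_dispatch (c : Char) (t : List Char) :
    ((pvGetIndex pvIndex c).any fun r => PySem.Chars.startswith t r.toList)
      = pvPatternsL.any fun q => PySem.Chars.startswith (c :: t) q.toList := by
  simp only [pvPatternsL, pvIndex, pvGetIndex, List.any_cons, List.any_nil,
    show "cargo.toml".toList = 'c' :: "argo.toml".toList from rfl,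
    show "cargo.lock".toList = 'c' :: "argo.lock".toList from rfl,
    show "package.json".toList = 'p' :: "ackage.json".toList from rfl,
    show "package-lock.json".toList = 'p' :: "ackage-lock.json".toList from rfl,
    show "makefile".toList = 'm' :: "akefile".toList from rfl,
    show "cmakelists.txt".toList = 'c' :: "makelists.txt".toList from rfl,
    show "build.rs".toList = 'b' :: "uild.rs".toList from rfl,
    show "build.gradle".toList = 'b' :: "uild.gradle".toList from rfl,
    show "pom.xml".toList = 'p' :: "om.xml".toList from rfl,
    show "requirements.txt".toList = 'r' :: "equirements.txt".toList from rfl,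
    show "go.mod".toList = 'g' :: "o.mod".toList from rfl,
    show "go.sum".toList = 'g' :: "o.sum".toList from rfl,
    show "lakefile.lean".toList = 'l' :: "akefile.lean".toList from rfl,
    show "lean-toolchain".toList = 'l' :: "ean-toolchain".toList from rfl,
    show "_coqproject".toList = '_' :: "coqproject".toList from rfl,
    show "dune".toList = 'd' :: "une".toList from rfl,
    show "dune-project".toList = 'd' :: "une-project".toList from rfl,
    show ".gitmodules".toList = '.' :: "gitmodules".toList from rfl,
    show "flake.nix".toList = 'f' :: "lake.nix".toList from rfl,
    show "index.json".toList = 'i' :: "ndex.json".toList from rfl,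
    show "manifest.json".toList = 'm' :: "anifest.json".toList from rfl,
    pv_startswith_cons]
  split_ifs <;> simp only [beq_iff_eq] at * <;> (try subst_vars) <;> simp_all

-- the scan is true iff some lowered pattern is an infix of the scanned list
theorem pvScanB_iff (s : List Char) :
    pvScanB s = true ↔ ∃ q ∈ pvPatternsL, q.toList <:+: s := by
  induction s with
  | nil =>
    rw [show pvScanB [] = false from rfl]
    constructor
    · intro h; exact absurd h (by decide)
    · rintro ⟨q, hq, hinf⟩
      exact absurd (List.infix_nil.mp hinf) (pv_patterns_ne_nil q hq)
  | cons a t ih =>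
    rw [pvScanB]
    by_cases h : ((pvGetIndex pvIndex a).any fun r => PySem.Chars.startswith t r.toList) = true
    · rw [if_pos h]
      simp only [true_iff]
      rw [pv_dispatch, List.any_eq_true] at h
      obtain ⟨q, hq, hpre⟩ := h
      exact ⟨q, hq, ((PySem.Chars.startswith_iff _ _).mp hpre).isInfix⟩
    · rw [if_neg h]
      show pvScanB t = true ↔ _
      rw [ih]
      constructor
      · rintro ⟨q, hq, hinf⟩
        exact ⟨q, hq, hinf.trans (List.suffix_cons a t).isInfix⟩
      · rintro ⟨q, hq, hinf⟩
        rcases List.infix_cons_iff.mp hinf with hpre | hinf'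
        · rw [pv_dispatch, List.any_eq_true] at h
          exact absurd ⟨q, hq, (PySem.Chars.startswith_iff _ _).mpr hpre⟩ h
        · exact ⟨q, hq, hinf'⟩

-- ===== VERDICT =====
theorem is_list_of_lists_spec : Claim_equal_is_list_of_lists := by
  intro path _
  unfold Spec_is_list_of_lists is_list_of_lists is_list_of_lists_alt
  rw [Bool.eq_iff_iff, List.any_eq_true, pvScanB_iff]
  constructor
  · rintro ⟨pat, hpat, hin⟩
    refine ⟨PySem.Str.lower pat, ?_, (PySem.Str.isIn_iff_infix _ _).mp hin⟩
    rw [← pv_patterns_lower]; exact List.mem_map_of_mem hpat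
  · rintro ⟨q, hq, hinf⟩
    rw [← pv_patterns_lower] at hq
    obtain ⟨pat, hpat, rfl⟩ := List.mem_map.mp hq
    exact ⟨pat, hpat, (PySem.Str.isIn_iff_infix _ _).mpr hinf⟩
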